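-- pv_equiv track=rewrite | github.com/SongY123/SpatialText2SQL | scripts/download_seattle_maps_geojson.py | _view_has_geo_columns
-- ===== SOURCE A (Python) =====
-- from typing import Any
--
-- GEO_DTYPES = {"location", "point", "polygon", "line", "multipolygon", "multiline", "multipoint"}
--
-- def _view_has_geo_columns(view: dict[str, Any]) -> bool:
--     columns = view.get("columns") or []
--     dtype_hits: set[str] = set()
--     name_blob: list[str] = []
--     for col in columns:
--         if not isinstance(col, dict):
--             continue
--         dtype = str(col.get("dataTypeName") or "").lower()
--         if dtype:
--             dtype_hits.add(dtype)
--         name_blob.append(str(col.get("name") or ""))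
--         name_blob.append(str(col.get("fieldName") or ""))
--     if dtype_hits & GEO_DTYPES:
--         return True
--     merged = " ".join(name_blob).lower()
--     for kw in ("the_geom", "geom", "geometry", "shape", "latitude", "longitude", "lat", "lon"):
--         if kw in merged:
--             return True
--     return False
-- ===== SOURCE B (Python) =====
-- from typing import Any
--
-- GEO_DTYPES = {"location", "point", "polygon", "line", "multipolygon", "multiline", "multipoint"}
--
-- _GEO_KEYWORDS = ("the_geom", "geom", "geometry", "shape", "latitude", "longitude", "lat", "lon")
--
--
-- def _view_has_geo_columns(view: dict[str, Any]) -> bool: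
--     # One streaming pass with early return; no intermediate set or joined name blob.
--     for col in view.get("columns") or []:
--         if not isinstance(col, dict):
--             continue
--         if str(col.get("dataTypeName") or "").lower() in GEO_DTYPES:
--             return True
--         for field in ("name", "fieldName"):
--             text = str(col.get(field) or "").lower()
--             if any(kw in text for kw in _GEO_KEYWORDS):
--                 return True
--     return False
-- ===== Notes on version B (the rewrite author's own statement) =====
-- stated objective: simpler
-- what changed: Replaces A's two-phase scheme (accumulate a dtype set and a joined name blob over all columns, then intersect with GEO_DTYPES and substring-scan the blob) with a single short-circuiting pass that decides each column on the spot; this is equivalent because the keywords contain no space, so a match in the space-joined blob is a match in some individual field.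
import Mathlib
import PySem

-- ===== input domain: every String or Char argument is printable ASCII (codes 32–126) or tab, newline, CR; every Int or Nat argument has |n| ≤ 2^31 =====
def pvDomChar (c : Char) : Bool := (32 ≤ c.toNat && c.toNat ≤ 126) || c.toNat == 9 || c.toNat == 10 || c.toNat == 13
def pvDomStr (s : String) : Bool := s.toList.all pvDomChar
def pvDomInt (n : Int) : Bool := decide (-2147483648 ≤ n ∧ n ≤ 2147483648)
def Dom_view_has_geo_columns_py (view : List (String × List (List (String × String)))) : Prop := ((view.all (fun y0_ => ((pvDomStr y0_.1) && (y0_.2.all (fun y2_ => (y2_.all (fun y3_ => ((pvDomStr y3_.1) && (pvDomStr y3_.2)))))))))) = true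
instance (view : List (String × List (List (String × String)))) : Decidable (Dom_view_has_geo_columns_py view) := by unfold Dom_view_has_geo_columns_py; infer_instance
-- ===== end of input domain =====

-- B replaces A's two-phase scheme (accumulate a dtype set and a space-joined name blob, then
-- post-process both) by a single short-circuiting per-column pass; equivalent because the
-- keywords contain no space. Objective: simpler.

-- ===== PORT A =====
-- module constant GEO_DTYPES (shared by both Pythons)
def pvGeoDtypes : PySem.Set String :=
  PySem.Set.ofList ["location", "point", "polygon", "line", "multipolygon", "multiline", "multipoint"]

-- the keyword tuple (identical literal in A and B)
def pvGeoKeywords : List String :=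
  ["the_geom", "geom", "geometry", "shape", "latitude", "longitude", "lat", "lon"]

-- literal port of A; the `isinstance(col, dict)` guard is always true under the type convention
def view_has_geo_columns_py (view : List (String × List (List (String × String)))) : Bool :=
  let columns := ((PySem.Dict.mk view).get? "columns").getD []
  let st := columns.foldl
    (fun (st : PySem.Set String × List String) col =>
      let dtype := PySem.Str.lower (((PySem.Dict.mk col).get? "dataTypeName").getD "")
      let hits := if dtype ≠ "" then st.1.add dtype else st.1
      (hits, st.2 ++ [((PySem.Dict.mk col).get? "name").getD "",
                      ((PySem.Dict.mk col).get? "fieldName").getD ""]))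
    (PySem.Set.empty, [])
  if PySem.Set.inter st.1 pvGeoDtypes ≠ [] then true
  else
    let merged := PySem.Str.lower (PySem.Str.join " " st.2)
    pvGeoKeywords.any (fun kw => PySem.Str.isIn kw merged)

-- ===== PORT B =====
def view_has_geo_columns_py_alt (view : List (String × List (List (String × String)))) : Bool :=
  (((PySem.Dict.mk view).get? "columns").getD []).any (fun col =>
    pvGeoDtypes.contains (PySem.Str.lower (((PySem.Dict.mk col).get? "dataTypeName").getD "")) ||
    (["name", "fieldName"] : List String).any (fun field =>
      let text := PySem.Str.lower (((PySem.Dict.mk col).get? field).getD "")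
      pvGeoKeywords.any (fun kw => PySem.Str.isIn kw text)))

-- ===== PRECONDITION & SPEC =====
def Spec_view_has_geo_columns_py (view : List (String × List (List (String × String)))) (out : Bool) : Prop := out = view_has_geo_columns_py_alt view
instance (view : List (String × List (List (String × String)))) (out : Bool) : Decidable (Spec_view_has_geo_columns_py view out) := by unfold Spec_view_has_geo_columns_py; infer_instance

-- ===== CLAIM (what is proved, stated in full; the proofs are below) =====
def Claim_equal_view_has_geo_columns_py : Prop := ∀ (view : List (String × List (List (String × String)))), Dom_view_has_geo_columns_py view → Spec_view_has_geo_columns_py view (view_has_geo_columns_py view)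

-- ===== LEMMAS AND PROOFS =====

-- a prefix of u ++ ' ' :: v that contains no space is a prefix of u
theorem pvPrefixSepSplit {kw u v : List Char} (hsp : ' ' ∉ kw)
    (h : kw <+: u ++ ' ' :: v) : kw <+: u := by
  have htake := List.prefix_iff_eq_take.mp h
  by_cases hlen : kw.length ≤ u.length
  · rw [List.take_append, Nat.sub_eq_zero_of_le hlen, List.take_zero, List.append_nil] at htake
    exact htake ▸ List.take_prefix _ _
  · exfalso
    have hlen : u.length < kw.length := Nat.lt_of_not_le hlen
    have hmem : kw[u.length]'hlen ∈ kw := List.getElem_mem hlen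
    have heq : kw[u.length]'hlen = (u ++ ' ' :: v)[u.length]'(by simp) := h.getElem hlen
    have hsep : (u ++ ' ' :: v)[u.length]'(by simp) = ' ' := by
      rw [List.getElem_append_right (Nat.le_refl u.length)]
      simp
    rw [heq, hsep] at hmem
    exact hsp hmem

-- an infix of u ++ ' ' :: v containing no space lies in u or in v
theorem pvInfixSepSplit {kw u v : List Char} (hsp : ' ' ∉ kw) :
    kw <:+: u ++ ' ' :: v ↔ (kw <:+: u ∨ kw <:+: v) := by
  constructor
  · intro h
    obtain ⟨j, hj⟩ := (PySem.Chars.exists_prefix_drop_iff_isIn kw _).mpr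
      ((PySem.Chars.isIn_iff_infix kw _).mpr h)
    by_cases hju : j ≤ u.length
    · rw [List.drop_append, Nat.sub_eq_zero_of_le hju, List.drop_zero] at hj
      left
      exact (PySem.Chars.isIn_iff_infix kw u).mp
        ((PySem.Chars.exists_prefix_drop_iff_isIn kw u).mp ⟨j, pvPrefixSepSplit hsp hj⟩)
    · right
      have hju : u.length < j := Nat.lt_of_not_le hju
      rw [List.drop_append, List.drop_of_length_le (by omega), List.nil_append] at hj
      obtain ⟨m, hm⟩ : ∃ m, j - u.length = m + 1 := ⟨j - u.length - 1, by omega⟩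
      rw [hm, List.drop_succ_cons] at hj
      exact (PySem.Chars.isIn_iff_infix kw v).mp
        ((PySem.Chars.exists_prefix_drop_iff_isIn kw v).mp ⟨_, hj⟩)
  · rintro (h | h)
    · exact h.trans (List.prefix_append u (' ' :: v)).isInfix
    · exact h.trans ⟨u ++ [' '], [], by simp⟩

-- an infix without spaces of a " "-join is an infix of one of the parts
theorem pvInfixJoin {kw : List Char} (hne : kw ≠ []) (hsp : ' ' ∉ kw) :
    ∀ ps : List (List Char), (kw <:+: PySem.Chars.join [' '] ps ↔ ∃ p ∈ ps, kw <:+: p)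
  | [] => by
      rw [PySem.Chars.join_nil]
      simp [List.infix_nil, hne]
  | [p] => by
      rw [PySem.Chars.join_singleton]
      simp
  | p :: q :: rest => by
      rw [PySem.Chars.join_cons_cons]
      have hshape : p ++ [' '] ++ PySem.Chars.join [' '] (q :: rest)
          = p ++ ' ' :: PySem.Chars.join [' '] (q :: rest) := by simp
      rw [hshape, pvInfixSepSplit hsp, pvInfixJoin hne hsp (q :: rest)]
      simp

-- lower distributes over a " "-join
theorem pvLowerJoin : ∀ ps : List (List Char),
    PySem.Chars.lower (PySem.Chars.join [' '] ps)
      = PySem.Chars.join [' '] (ps.map PySem.Chars.lower)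
  | [] => by rw [PySem.Chars.join_nil]; rfl
  | [p] => by rw [List.map_singleton, PySem.Chars.join_singleton, PySem.Chars.join_singleton]
  | p :: q :: rest => by
      rw [List.map_cons, List.map_cons, PySem.Chars.join_cons_cons, PySem.Chars.join_cons_cons,
        ← List.map_cons, ← pvLowerJoin (q :: rest)]
      have hlsp : PySem.Chars.lowerChar ' ' = ' ' := by decide
      simp [PySem.Chars.lower, hlsp]

-- the empty string is not a geo dtype
theorem pvEmptyNotGeo : ("" : String) ∉ pvGeoDtypes := by decide

-- every keyword is nonempty and contains no space
theorem pvKeywordsGood : ∀ kw ∈ pvGeoKeywords, kw.toList ≠ [] ∧ ' ' ∉ kw.toList := by decide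

-- both sides characterised, then pure logic
theorem view_has_geo_columns_py_eq (view : List (String × List (List (String × String)))) :
    view_has_geo_columns_py view = view_has_geo_columns_py_alt view := by
  rw [Bool.eq_iff_iff]
  unfold view_has_geo_columns_py view_has_geo_columns_py_alt
  simp only []
  set cols := ((PySem.Dict.mk view).get? "columns").getD [] with hcols
  set d : List (String × String) → String :=
    fun col => PySem.Str.lower (((PySem.Dict.mk col).get? "dataTypeName").getD "") with hd
  set nm : List (String × String) → String :=
    fun col => ((PySem.Dict.mk col).get? "name").getD "" with hnm
  set fl : List (String × String) → String :=
    fun col => ((PySem.Dict.mk col).get? "fieldName").getD "" with hfl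
  rw [PySem.List.foldl_prod_mk
      (f := fun s col => if d col ≠ "" then PySem.Set.add s (d col) else s)
      (g := fun b col => b ++ [nm col, fl col])]
  rw [PySem.List.foldl_ite_eq_foldl_filter (p := fun col => d col ≠ "")
      (f := fun s col => PySem.Set.add s (d col))]
  rw [PySem.List.foldl_append_eq_flatMap (g := fun col => [nm col, fl col])]
  constructor
  · intro h
    split_ifs at h with hcond
    · -- intersection nonempty
      obtain ⟨x, hx⟩ := List.exists_mem_of_ne_nil _ hcond
      rw [PySem.Set.mem_inter] at hx
      obtain ⟨hx1, hx2⟩ := hx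
      rw [PySem.Set.mem_foldl_add] at hx1
      rcases hx1 with hx1 | ⟨col, hcolmem, hx1⟩
      · exact absurd hx1 (List.not_mem_nil)
      · rw [List.mem_filter] at hcolmem
        rw [List.any_eq_true]
        refine ⟨col, hcolmem.1, ?_⟩
        apply Bool.or_eq_true_iff.mpr; left
        rw [PySem.Set.contains_iff]
        have hgoal : d col ∈ pvGeoDtypes := hx1 ▸ hx2
        exact hgoal
    · -- keyword match in the merged blob
      rw [List.any_eq_true] at h
      obtain ⟨kw, hkwmem, hkw⟩ := h
      rw [PySem.Str.isIn_iff_infix] at hkw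
      rw [PySem.Str.toList_lower, PySem.Str.toList_join] at hkw
      have hsepchar : (" " : String).toList = [' '] := rfl
      rw [hsepchar, pvLowerJoin] at hkw
      obtain ⟨hne, hsp⟩ := pvKeywordsGood kw hkwmem
      rw [pvInfixJoin hne hsp] at hkw
      obtain ⟨p, hpmem, hpinf⟩ := hkw
      rw [List.mem_map] at hpmem
      obtain ⟨b, hbmem, rfl⟩ := hpmem
      rw [List.mem_map] at hbmem
      obtain ⟨s, hsmem, rfl⟩ := hbmem
      rw [List.nil_append, List.mem_flatMap] at hsmem
      obtain ⟨col, hcolmem, hscol⟩ := hsmem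
      rw [List.any_eq_true]
      refine ⟨col, hcolmem, ?_⟩
      apply Bool.or_eq_true_iff.mpr; right
      rw [List.any_eq_true]
      rcases List.mem_pair.mp hscol with rfl | rfl
      · exact ⟨"name", by simp, by
          rw [List.any_eq_true]
          exact ⟨kw, hkwmem, by
            rw [PySem.Str.isIn_iff_infix, PySem.Str.toList_lower]
            exact hpinf⟩⟩
      · exact ⟨"fieldName", by simp, by
          rw [List.any_eq_true]
          exact ⟨kw, hkwmem, by
            rw [PySem.Str.isIn_iff_infix, PySem.Str.toList_lower]
            exact hpinf⟩⟩
  · intro h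
    rw [List.any_eq_true] at h
    obtain ⟨col, hcolmem, hcol⟩ := h
    rcases Bool.or_eq_true_iff.mp hcol with hdt | hfield
    · -- dtype hit ⇒ the intersection is nonempty
      rw [PySem.Set.contains_iff] at hdt
      have hdne : d col ≠ "" := fun he => pvEmptyNotGeo (he ▸ hdt)
      have hmem : d col ∈ PySem.Set.inter
          ((cols.filter (fun col => decide (d col ≠ ""))).foldl
            (fun s col => PySem.Set.add s (d col)) PySem.Set.empty) pvGeoDtypes := by
        rw [PySem.Set.mem_inter, PySem.Set.mem_foldl_add]
        exact ⟨Or.inr ⟨col, List.mem_filter.mpr ⟨hcolmem, by simpa using hdne⟩, rfl⟩, hdt⟩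
      rw [if_pos (List.ne_nil_of_mem hmem)]
    · -- name/fieldName hit ⇒ the merged blob contains the keyword
      rw [List.any_eq_true] at hfield
      obtain ⟨field, hfmem, htext⟩ := hfield
      rw [List.any_eq_true] at htext
      obtain ⟨kw, hkwmem, hkw⟩ := htext
      have hblob : ∃ b ∈ [] ++ cols.flatMap (fun col => [nm col, fl col]),
          kw.toList <:+: PySem.Chars.lower b.toList := by
        rw [PySem.Str.isIn_iff_infix, PySem.Str.toList_lower] at hkw
        rcases List.mem_pair.mp hfmem with rfl | rfl
        · exact ⟨nm col, by rw [List.nil_append, List.mem_flatMap]; exact ⟨col, hcolmem, by simp [hnm]⟩, hkw⟩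
        · exact ⟨fl col, by rw [List.nil_append, List.mem_flatMap]; exact ⟨col, hcolmem, by simp [hfl]⟩, hkw⟩
      split_ifs with hcond
      · rfl
      · rw [List.any_eq_true]
        refine ⟨kw, hkwmem, ?_⟩
        rw [PySem.Str.isIn_iff_infix, PySem.Str.toList_lower, PySem.Str.toList_join]
        have hsepchar : (" " : String).toList = [' '] := rfl
        rw [hsepchar, pvLowerJoin]
        obtain ⟨hne, hsp⟩ := pvKeywordsGood kw hkwmem
        rw [pvInfixJoin hne hsp]
        obtain ⟨b, hbmem, hbinf⟩ := hblob
        exact ⟨PySem.Chars.lower b.toList,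
          List.mem_map.mpr ⟨b.toList, List.mem_map.mpr ⟨b, hbmem, rfl⟩, rfl⟩, hbinf⟩

-- ===== VERDICT (by name: the statement is the Claim_ definition above) =====
theorem view_has_geo_columns_py_spec : Claim_equal_view_has_geo_columns_py := by
  intro view _
  unfold Spec_view_has_geo_columns_py
  exact view_has_geo_columns_py_eq view
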